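-- pv_equiv track=rewrite | github.com/polsi05/template_builder | legacy/template_builder_legacy.py | images_to_html
-- ===== SOURCE A (Python) =====
-- from typing import Callable, Dict, List, Tuple, Union
--
-- def images_to_html(rows: List[Tuple[str, str]], cols: int) -> str:
--     """Render immagini in righe di `cols` colonne; avanzamento centrato."""
--     if not rows:
--         return ''
--     html_lines: List[str] = []
--     per = max(1, cols)
--     width_pct = int(100 / per) - 1
--     for i in range(0, len(rows), per):
--         chunk = rows[i:i+per]
--         if len(chunk) == per:
--             html_lines.append('<div class="img-row">')
--             for src, alt in chunk:
--                 if src: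
--                     html_lines.append(
--                         f"<img src='{src}' alt='{alt}' "
--                         f"style='width:{width_pct}%;margin:0.5%;display:inline-block;'>"
--                     )
--             html_lines.append('</div>')
--         else:
--             html_lines.append('<div class="img-row single">')
--             for src, alt in chunk:
--                 if src:
--                     html_lines.append(
--                         f"<img src='{src}' alt='{alt}' "
--                         f"style='display:block;margin:0 auto;width:auto;max-width:90%;'>"
--                     )
--             html_lines.append('</div>')
--     return '\n'.join(html_lines)
-- ===== SOURCE B (Python) =====
-- from typing import List, Tuple
--
-- def images_to_html(rows: List[Tuple[str, str]], cols: int) -> str: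
--     """Render immagini: unico passaggio piatto guidato dall'indice."""
--     per = max(1, cols)
--     n = len(rows)
--     cut = n - n % per  # first index of the incomplete tail row, if any
--     w = 100 // per - 1
--     out: List[str] = []
--     for j, (src, alt) in enumerate(rows):
--         if j % per == 0:
--             out.append('<div class="img-row">' if j < cut else '<div class="img-row single">')
--         if src:
--             if j < cut:
--                 out.append(
--                     f"<img src='{src}' alt='{alt}' "
--                     f"style='width:{w}%;margin:0.5%;display:inline-block;'>"
--                 )
--             else:
--                 out.append(
--                     f"<img src='{src}' alt='{alt}' "
--                     f"style='display:block;margin:0 auto;width:auto;max-width:90%;'>"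
--                 )
--         if j % per == per - 1 or j == n - 1:
--             out.append('</div>')
--     return '\n'.join(out)
-- ===== Notes on version B (the rewrite author's own statement) =====
-- stated objective: alternative
-- what changed: A slices the list into per-sized chunks and tests each chunk's completeness to choose the row markup; B never slices: it makes one flat pass over enumerate(rows), deciding div openings/closings and the per-image style purely by index arithmetic (j % per, j < cut, j == n-1).
import Mathlib
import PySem

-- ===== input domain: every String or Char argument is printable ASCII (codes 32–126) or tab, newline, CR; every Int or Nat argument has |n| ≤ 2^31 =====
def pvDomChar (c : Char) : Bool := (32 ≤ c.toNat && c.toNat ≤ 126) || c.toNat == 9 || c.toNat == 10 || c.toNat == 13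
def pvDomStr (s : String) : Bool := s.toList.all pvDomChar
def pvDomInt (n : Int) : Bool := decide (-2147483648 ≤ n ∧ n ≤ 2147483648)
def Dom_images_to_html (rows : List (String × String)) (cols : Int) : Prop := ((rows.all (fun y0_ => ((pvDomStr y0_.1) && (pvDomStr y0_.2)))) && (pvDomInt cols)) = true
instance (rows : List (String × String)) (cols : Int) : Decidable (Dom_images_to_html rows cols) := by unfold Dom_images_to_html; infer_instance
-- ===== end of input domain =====

-- B replaces A's chunk-slicing loop by one flat pass over enumerate(rows) in which div
-- openings/closings and the per-image style are decided by index arithmetic alone;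
-- objective: alternative decomposition (no slicing, no chunk lists).

-- ===== PORT A =====
-- the two f-string image lines (shared by both ports verbatim, as in both Pythons)
def pvImgFull (w : Int) (q : String × String) : String :=
  "<img src='" ++ q.1 ++ "' alt='" ++ q.2 ++ "' style='width:" ++ PySem.Int.toStr w ++ "%;margin:0.5%;display:inline-block;'>"

def pvImgSingle (q : String × String) : String :=
  "<img src='" ++ q.1 ++ "' alt='" ++ q.2 ++ "' style='display:block;margin:0 auto;width:auto;max-width:90%;'>"

-- body of A's `for i in range(0, len(rows), per)` loop
def pvBodyA (rows : List (String × String)) (per w : Int) (acc : List String) (i : Int) : List String :=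
  let chunk := PySem.List.slice rows (some i) (some (i + per))
  if (chunk.length : Int) = per then
    (chunk.foldl (fun a q => if q.1 ≠ "" then a ++ [pvImgFull w q] else a)
      (acc ++ ["<div class=\"img-row\">"])) ++ ["</div>"]
  else
    (chunk.foldl (fun a q => if q.1 ≠ "" then a ++ [pvImgSingle q] else a)
      (acc ++ ["<div class=\"img-row single\">"])) ++ ["</div>"]

def images_to_html (rows : List (String × String)) (cols : Int) : String :=
  if rows = [] then "" else
    let per : Int := max 1 cols
    let w : Int := PySem.Int.truncdiv 100 per - 1   -- int(100 / per) - 1 (exact here: see comment at pv_trunc_eq_floor)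
    PySem.Str.join "\n"
      ((PySem.List.pyRange 0 (rows.length : Int) per).foldl (pvBodyA rows per w) [])

-- ===== PORT B =====
-- body of B's `for j, (src, alt) in enumerate(rows)` loop: three index-driven appends
def pvBodyB (per w cut n : Int) (acc : List String) (e : Int × (String × String)) : List String :=
  let acc := if PySem.Int.mod e.1 per = 0 then
      acc ++ [if e.1 < cut then "<div class=\"img-row\">" else "<div class=\"img-row single\">"]
    else acc
  let acc := if e.2.1 ≠ "" then
      acc ++ [if e.1 < cut then pvImgFull w e.2 else pvImgSingle e.2]
    else acc
  if PySem.Int.mod e.1 per = per - 1 ∨ e.1 = n - 1 then acc ++ ["</div>"] else acc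

def images_to_html_alt (rows : List (String × String)) (cols : Int) : String :=
  let per : Int := max 1 cols
  let n : Int := rows.length
  let cut : Int := n - PySem.Int.mod n per
  let w : Int := PySem.Int.floordiv 100 per - 1
  PySem.Str.join "\n" ((PySem.List.enumerate rows 0).foldl (pvBodyB per w cut n) [])

-- ===== PRECONDITION & SPEC =====
def Spec_images_to_html (rows : List (String × String)) (cols : Int) (out : String) : Prop := out = images_to_html_alt rows cols
instance (rows : List (String × String)) (cols : Int) (out : String) : Decidable (Spec_images_to_html rows cols out) := by unfold Spec_images_to_html; infer_instance

-- ===== CLAIM (what is proved, stated in full; the proofs are below) =====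
def Claim_equal_images_to_html : Prop := ∀ (rows : List (String × String)) (cols : Int), Dom_images_to_html rows cols → Spec_images_to_html rows cols (images_to_html rows cols)

-- ===== LEMMAS AND PROOFS =====

-- the lines of one complete row of images
def pvFullDiv (w : Int) (xs : List (String × String)) : List String :=
  ["<div class=\"img-row\">"] ++ (xs.filter (fun q => q.1 ≠ "")).map (pvImgFull w) ++ ["</div>"]

-- the lines of the single (incomplete) trailing row
def pvSingleDiv (xs : List (String × String)) : List String :=
  ["<div class=\"img-row single\">"] ++ (xs.filter (fun q => q.1 ≠ "")).map pvImgSingle ++ ["</div>"]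

-- reference chunking with chunk size q+1 (common characterisation of both programs)
def pvRef (w : Int) (q : Nat) (xs : List (String × String)) : List String :=
  if hx : xs = [] then [] else
  if q + 1 ≤ xs.length then pvFullDiv w (xs.take (q+1)) ++ pvRef w q (xs.drop (q+1))
  else pvSingleDiv xs
termination_by xs.length
decreasing_by
  have : 0 < xs.length := List.length_pos_of_ne_nil hx
  simp [List.length_drop]; omega

-- int(100 / per) with 1 ≤ per: float division of these magnitudes truncates to the exact quotient
lemma pv_trunc_eq_floor (a b : Int) (h : 0 ≤ a) (hb : 0 < b) :
    PySem.Int.truncdiv a b = PySem.Int.floordiv a b := by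
  rw [PySem.Int.floordiv_eq_ediv_of_pos hb]
  simpa [PySem.Int.truncdiv] using Int.tdiv_eq_ediv_of_nonneg h

lemma pv_pyRange_pos_cons (a b s : Int) (hs : 0 < s) (h : a < b) :
    PySem.List.pyRange a b s = a :: PySem.List.pyRange (a+s) b s := by
  rw [PySem.List.pyRange_of_pos _ _ hs, PySem.List.pyRange_of_pos _ _ hs]
  have key : (b - a + s - 1) / s = (b - a - 1) / s + 1 := by
    have := Int.add_mul_ediv_right (b - a - 1) 1 (by omega : s ≠ 0)
    rw [show b - a + s - 1 = b - a - 1 + 1 * s by ring, this]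
  have hnn : 0 ≤ (b - a - 1) / s := Int.ediv_nonneg (by omega) (le_of_lt hs)
  have hm : ((b - a + s - 1) / s).toNat
      = (if a + s < b then ((b - (a+s) + s - 1) / s).toNat else 0) + 1 := by
    split_ifs with h2
    · rw [show b - (a+s) + s - 1 = b - a - 1 by ring]; omega
    · have h0 : (b - a - 1) / s = 0 := Int.ediv_eq_zero_of_lt (by omega) (by omega)
      omega
  rw [hm, if_pos h, List.range_succ_eq_map, List.map_cons, List.map_map]
  simp only [Nat.cast_zero, mul_zero, add_zero]
  congr 1
  apply List.map_congr_left
  intro k _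
  simp only [Function.comp_apply]
  push_cast
  ring

lemma pv_pyRange_pos_nil (a b s : Int) (hs : 0 < s) (h : b ≤ a) :
    PySem.List.pyRange a b s = [] := by
  rw [PySem.List.pyRange_of_pos _ _ hs]
  simp [show ¬ a < b by omega]

-- A's inner `for src, alt in chunk: if src: append` loop is filter-then-map
lemma pv_foldl_if_ne (f : (String × String) → String) (l : List (String × String)) (acc : List String) :
    List.foldl (fun a q => if q.1 ≠ "" then a ++ [f q] else a) acc l
      = acc ++ (l.filter (fun q => q.1 ≠ "")).map f := by
  simpa using PySem.List.foldl_append_if (fun q => q.1 != "") f l acc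

lemma pv_A_loop (rows : List (String × String)) (w : Int) (p : Nat) (hp : 1 ≤ p) :
    ∀ (fuel i : Nat) (acc : List String), rows.length ≤ i + fuel →
    (PySem.List.pyRange (i : Int) (rows.length : Int) (p : Int)).foldl (pvBodyA rows (p : Int) w) acc
      = acc ++ pvRef w (p-1) (rows.drop i) := by
  intro fuel
  induction fuel with
  | zero =>
      intro i acc hb
      rw [pv_pyRange_pos_nil _ _ _ (by exact_mod_cast hp) (by exact_mod_cast hb)]
      rw [List.drop_eq_nil_of_le (by omega), pvRef]
      simp
  | succ fuel ih =>
      intro i acc hb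
      by_cases hlt : i < rows.length
      · rw [pv_pyRange_pos_cons _ _ _ (by exact_mod_cast hp) (by exact_mod_cast hlt)]
        rw [List.foldl_cons]
        have hchunk : PySem.List.slice rows (some (i:Int)) (some ((i:Int) + (p:Int)))
            = (rows.drop i).take p := by
          exact_mod_cast PySem.List.slice_natCast_add rows i p
        set rest := rows.drop i with hrest
        have hrlen : rest.length = rows.length - i := by simp [hrest]
        have hbody : pvBodyA rows (p:Int) w acc (i:Int)
            = if (((rest.take p).length : Int) = (p:Int)) then
                acc ++ pvFullDiv w (rest.take p)
              else acc ++ pvSingleDiv (rest.take p) := by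
          simp only [pvBodyA, hchunk]
          split
          · rw [pv_foldl_if_ne]; simp [pvFullDiv]
          · rw [pv_foldl_if_ne]; simp [pvSingleDiv]
        by_cases hfull : p ≤ rest.length
        · have hlen : (rest.take p).length = p := by simp [hfull]
          rw [hbody, if_pos (by exact_mod_cast hlen)]
          have hcast : (i:Int) + (p:Int) = ((i + p : Nat) : Int) := by push_cast; ring
          rw [hcast, ih (i + p) _ (by omega)]
          have hdrop : rows.drop (i + p) = rest.drop p := by
            simp [hrest, List.drop_drop, Nat.add_comm]
          rw [hdrop]
          conv_rhs => rw [pvRef]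
          rw [dif_neg (by intro hnil; rw [hnil] at hrlen; simp at hrlen; omega)]
          rw [if_pos (by omega : (p-1) + 1 ≤ rest.length)]
          rw [show (p-1) + 1 = p by omega]
          simp [List.append_assoc]
        · have htake : rest.take p = rest := List.take_of_length_le (by omega)
          have hne : ¬ (((rest.take p).length : Int) = (p:Int)) := by
            rw [htake]; intro hcontra
            have : rest.length = p := by exact_mod_cast hcontra
            omega
          rw [hbody, if_neg hne, htake]
          rw [show (i:Int) + (p:Int) = ((i + p : Nat) : Int) by push_cast; ring]
          rw [pv_pyRange_pos_nil _ _ _ (by exact_mod_cast hp) (by exact_mod_cast (by omega : rows.length ≤ i + p))]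
          conv_rhs => rw [pvRef]
          rw [dif_neg (by intro hnil; rw [hnil] at hrlen; simp at hrlen; omega)]
          rw [if_neg (by omega : ¬ ((p-1) + 1 ≤ rest.length))]
          simp
      · rw [pv_pyRange_pos_nil _ _ _ (by exact_mod_cast hp) (by exact_mod_cast (by omega : rows.length ≤ i))]
        rw [List.drop_eq_nil_of_le (by omega), pvRef]
        simp

-- index m lies r places into a block of p starting at a multiple of p: m % p = r
lemma pv_mod_run (p k r : Nat) (hr : r < p) : (k * p + r) % p = r := by
  rw [Nat.add_comm, Nat.add_mul_mod_self_right]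
  exact Nat.mod_eq_of_lt hr

-- B, inner run of a div (everything after the opening element): per element only the image
-- append fires, and the final element (index L) additionally closes the div
lemma pv_B_inner (p : Nat) (w : Int) (nn cutN L : Nat) (sty : Bool)
    (hp : 1 ≤ p) (hL : L < nn) :
    ∀ (l : List (String × String)) (j : Nat) (acc : List String),
    l ≠ [] → j + l.length = L + 1 →
    (∀ m : Nat, j ≤ m → m ≤ L → m % p ≠ 0) →
    (∀ m : Nat, j ≤ m → m < L → m % p ≠ p - 1) →
    (L % p = p - 1 ∨ L = nn - 1) →
    (∀ m : Nat, j ≤ m → m ≤ L → decide (m < cutN) = sty) →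
    (PySem.List.enumerate l (j : Int)).foldl (pvBodyB (p : Int) w (cutN : Int) (nn : Int)) acc
      = acc ++ (l.filter (fun q => q.1 ≠ "")).map (if sty then pvImgFull w else pvImgSingle) ++ ["</div>"] := by
  intro l
  induction l with
  | nil => intro j acc hne; exact absurd rfl hne
  | cons a t ih =>
      intro j acc _ hlen h0 hpm1 hclose hsty
      have hjL : j ≤ L := by simp at hlen; omega
      rw [PySem.List.enumerate_cons, List.foldl_cons]
      have hmod : PySem.Int.mod (j:Int) (p:Int) = ((j % p : Nat) : Int) :=
        PySem.Int.mod_natCast j p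
      have hopen : ¬ (PySem.Int.mod (j:Int) (p:Int) = 0) := by
        rw [hmod]; exact_mod_cast h0 j le_rfl hjL
      have hstyj : (if ((j:Int) < (cutN:Int)) then pvImgFull w a else pvImgSingle a)
          = (if sty then pvImgFull w else pvImgSingle) a := by
        have := hsty j le_rfl hjL
        cases sty <;> simp_all
      have hbody : pvBodyB (p:Int) w (cutN:Int) (nn:Int) acc ((j:Int), a)
          = (if a.1 ≠ "" then acc ++ [(if sty then pvImgFull w else pvImgSingle) a] else acc)
            ++ (if j = L then ["</div>"] else []) := by
        simp only [pvBodyB, if_neg hopen]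
        rw [hstyj]
        by_cases hjeq : j = L
        · subst hjeq
          have hcl : PySem.Int.mod (j:Int) (p:Int) = (p:Int) - 1 ∨ (j:Int) = (nn:Int) - 1 := by
            rcases hclose with h | h
            · left; rw [hmod, h]; omega
            · right; omega

          rw [if_pos hcl]; simp
        · have hcl : ¬ (PySem.Int.mod (j:Int) (p:Int) = (p:Int) - 1 ∨ (j:Int) = (nn:Int) - 1) := by
            rintro (hc | hc)
            · rw [hmod] at hc
              exact hpm1 j le_rfl (by omega) (by omega)
            · omega
          rw [if_neg hcl]; simp [hjeq]
      rw [hbody]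
      by_cases htnil : t = []
      · subst htnil
        simp at hlen
        rw [if_pos (by omega : j = L)]
        simp only [PySem.List.enumerate_nil, List.foldl_nil, List.filter_cons, List.filter_nil]
        by_cases hsrc : a.1 = "" <;> simp [hsrc]
      · have hjlt : j < L := by
          have : 0 < t.length := List.length_pos_of_ne_nil htnil
          simp at hlen; omega
        rw [if_neg (by omega : ¬ j = L)]
        have hstep : ((j:Int) + 1) = ((j+1 : Nat) : Int) := by push_cast; ring
        rw [List.append_nil, hstep,
          ih (j+1) _ htnil (by simp at hlen ⊢; omega)
            (fun m h1 h2 => h0 m (by omega) h2)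
            (fun m h1 h2 => hpm1 m (by omega) h2)
            hclose
            (fun m h1 h2 => hsty m (by omega) h2)]
        by_cases hsrc : a.1 = "" <;> simp [hsrc, List.append_assoc]

-- B, one complete row: the p elements starting at index k*p (with k*p + p within the full part)
-- emit exactly pvFullDiv of the chunk
lemma pv_B_chunkFull (p : Nat) (w : Int) (nn : Nat) (hp : 1 ≤ p)
    (chunk : List (String × String)) (k : Nat) (acc : List String)
    (hlen : chunk.length = p) (hle : (k+1) * p ≤ nn - nn % p) :
    (PySem.List.enumerate chunk ((k * p : Nat) : Int)).foldl
        (pvBodyB (p : Int) w ((nn - nn % p : Nat) : Int) ((nn : Int))) acc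
      = acc ++ pvFullDiv w chunk := by
  have hmodle : nn % p ≤ nn := Nat.mod_le nn p
  have hcut_le : nn - nn % p ≤ nn := by omega
  have hle' : k * p + p ≤ nn - nn % p := by
    have h := hle; rw [Nat.add_mul, one_mul] at h; omega
  obtain ⟨a, t, rfl⟩ : ∃ a t, chunk = a :: t := by
    cases chunk with
    | nil => simp at hlen; omega
    | cons a t => exact ⟨a, t, rfl⟩
  rw [PySem.List.enumerate_cons, List.foldl_cons]
  have hkp_mod : (k * p) % p = 0 := Nat.mul_mod_left k p
  have hmod : PySem.Int.mod ((k*p : Nat):Int) (p:Int) = (((k*p) % p : Nat) : Int) :=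
    PySem.Int.mod_natCast (k*p) p
  have hopen : PySem.Int.mod ((k*p : Nat):Int) (p:Int) = 0 := by
    rw [hmod, hkp_mod]; simp
  have hlt_cut : ((k*p : Nat):Int) < ((nn - nn % p : Nat) : Int) := by
    exact_mod_cast (show k * p < nn - nn % p by omega)
  have hbody : pvBodyB (p:Int) w ((nn - nn % p : Nat):Int) (nn:Int) acc (((k*p : Nat):Int), a)
      = (let acc := acc ++ ["<div class=\"img-row\">"]
         let acc := if a.1 ≠ "" then acc ++ [pvImgFull w a] else acc
         if PySem.Int.mod ((k*p : Nat):Int) (p:Int) = (p:Int) - 1 ∨ ((k*p:Nat):Int) = (nn:Int) - 1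
         then acc ++ ["</div>"] else acc) := by
    simp only [pvBodyB, if_pos hopen, if_pos hlt_cut]
  rw [hbody]
  by_cases hp1 : p = 1
  · subst hp1
    have ht : t = [] := by simpa using hlen
    subst ht
    have hcl : PySem.Int.mod ((k*1 : Nat):Int) ((1:Nat):Int) = ((1:Nat):Int) - 1 ∨ ((k*1:Nat):Int) = (nn:Int) - 1 := by
      left; rw [hopen]; simp
    simp only [hcl, if_pos, PySem.List.enumerate_nil, List.foldl_nil]
    by_cases hsrc : a.1 = "" <;> simp [hsrc, pvFullDiv]
  · have hp2 : 2 ≤ p := by omega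
    have hnocl : ¬ (PySem.Int.mod ((k*p : Nat):Int) (p:Int) = (p:Int) - 1 ∨ ((k*p:Nat):Int) = (nn:Int) - 1) := by
      rintro (hc | hc)
      · rw [hopen] at hc; omega
      · omega
    rw [if_neg hnocl]
    have htne : t ≠ [] := by
      intro h; subst h; simp at hlen; omega
    have hstep : ((k*p : Nat):Int) + 1 = ((k*p + 1 : Nat) : Int) := by push_cast; ring
    rw [hstep]
    have hinner := fun acc' => pv_B_inner p w nn (nn - nn % p) (k*p + p - 1) true hp
      (by omega : k*p + p - 1 < nn)
      t (k*p+1) acc' htne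
      (by simp at hlen ⊢; omega)
      (by intro m h1 h2
          have h := pv_mod_run p k (m - k*p) (by omega)
          rw [show k*p + (m - k*p) = m by omega] at h
          omega)
      (by intro m h1 h2
          have h := pv_mod_run p k (m - k*p) (by omega)
          rw [show k*p + (m - k*p) = m by omega] at h
          omega)
      (by left
          have h := pv_mod_run p k (p - 1) (by omega)
          rw [show k*p + (p - 1) = k*p + p - 1 by omega] at h
          exact h)
      (by intro m h1 h2; simp; omega)
    rw [hinner _]
    by_cases hsrc : a.1 = "" <;>
      simp [hsrc, pvFullDiv, List.append_assoc]

-- B, the incomplete trailing row: the elements from index cut = nn - nn % p (nonempty, fewer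
-- than p of them) emit exactly pvSingleDiv of the tail
lemma pv_B_tail (p : Nat) (w : Int) (nn : Nat) (hp : 1 ≤ p)
    (tl : List (String × String)) (acc : List String)
    (hlen : tl.length = nn % p) (hne : tl ≠ []) :
    (PySem.List.enumerate tl ((nn - nn % p : Nat) : Int)).foldl
        (pvBodyB (p : Int) w ((nn - nn % p : Nat) : Int) ((nn : Int))) acc
      = acc ++ pvSingleDiv tl := by
  have hmodlt : nn % p < p := Nat.mod_lt nn (by omega)
  have hmodle : nn % p ≤ nn := Nat.mod_le nn p
  have hca : nn - nn % p + nn % p = nn := Nat.sub_add_cancel hmodle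
  have hpos : 0 < nn % p := by
    have := List.length_pos_of_ne_nil hne; omega
  have hcutmod : (nn - nn % p) % p = 0 := by
    have hd : nn / p * p + nn % p = nn := Nat.div_add_mod' nn p
    rw [show nn - nn % p = nn / p * p by omega, Nat.mul_mod_left]
  obtain ⟨a, t, rfl⟩ : ∃ a t, tl = a :: t := by
    cases tl with
    | nil => exact absurd rfl hne
    | cons a t => exact ⟨a, t, rfl⟩
  rw [PySem.List.enumerate_cons, List.foldl_cons]
  have hmod : PySem.Int.mod ((nn - nn % p : Nat):Int) (p:Int) = (((nn - nn % p) % p : Nat) : Int) :=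
    PySem.Int.mod_natCast (nn - nn % p) p
  have hopen : PySem.Int.mod ((nn - nn % p : Nat):Int) (p:Int) = 0 := by
    rw [hmod, hcutmod]; simp
  have hnotlt : ¬ (((nn - nn % p : Nat):Int) < ((nn - nn % p : Nat) : Int)) := lt_irrefl _
  have hbody : pvBodyB (p:Int) w ((nn - nn % p : Nat):Int) (nn:Int) acc (((nn - nn % p : Nat):Int), a)
      = (let acc := acc ++ ["<div class=\"img-row single\">"]
         let acc := if a.1 ≠ "" then acc ++ [pvImgSingle a] else acc
         if PySem.Int.mod ((nn - nn % p : Nat):Int) (p:Int) = (p:Int) - 1 ∨ ((nn - nn % p:Nat):Int) = (nn:Int) - 1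
         then acc ++ ["</div>"] else acc) := by
    simp only [pvBodyB, if_pos hopen, if_neg hnotlt]
  rw [hbody]
  by_cases ht1 : t = []
  · subst ht1
    have hlast : nn - nn % p = nn - 1 := by simp at hlen; omega
    have hcl : PySem.Int.mod ((nn - nn % p : Nat):Int) (p:Int) = (p:Int) - 1 ∨ ((nn - nn % p:Nat):Int) = (nn:Int) - 1 := by
      right; rw [hlast]; omega
    simp only [hcl, if_pos, PySem.List.enumerate_nil, List.foldl_nil]
    by_cases hsrc : a.1 = "" <;> simp [hsrc, pvSingleDiv]
  · have htlen : t.length = nn % p - 1 := by simp at hlen; omega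
    have h2le : 2 ≤ nn % p := by
      have := List.length_pos_of_ne_nil ht1; omega
    have hnocl : ¬ (PySem.Int.mod ((nn - nn % p : Nat):Int) (p:Int) = (p:Int) - 1 ∨ ((nn - nn % p:Nat):Int) = (nn:Int) - 1) := by
      rintro (hc | hc)
      · rw [hopen] at hc; omega
      · omega
    rw [if_neg hnocl]
    have hstep : ((nn - nn % p : Nat):Int) + 1 = ((nn - nn % p + 1 : Nat) : Int) := by push_cast; ring
    rw [hstep]
    have hinner := fun acc' => pv_B_inner p w nn (nn - nn % p) (nn - 1) false hp
      (by omega : nn - 1 < nn)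
      t (nn - nn % p + 1) acc' ht1
      (by omega)
      (by intro m h1 h2
          have hd : nn / p * p + nn % p = nn := Nat.div_add_mod' nn p
          have h := pv_mod_run p (nn / p) (m - (nn - nn % p)) (by omega)
          rw [show (nn / p) * p + (m - (nn - nn % p)) = m by omega] at h
          omega)
      (by intro m h1 h2
          have hd : nn / p * p + nn % p = nn := Nat.div_add_mod' nn p
          have h := pv_mod_run p (nn / p) (m - (nn - nn % p)) (by omega)
          rw [show (nn / p) * p + (m - (nn - nn % p)) = m by omega] at h
          omega)
      (by right; rfl)
      (by intro m h1 h2; simp; omega)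
    rw [hinner _]
    by_cases hsrc : a.1 = "" <;>
      simp [hsrc, pvSingleDiv, List.append_assoc]

-- B, whole pass: the flat fold over the enumerated suffix starting at a chunk boundary k*p
-- produces the same reference chunking pvRef as A's loop
lemma pv_B_loop (rows : List (String × String)) (w : Int) (p : Nat) (hp : 1 ≤ p) :
    ∀ (fuel k : Nat) (acc : List String), rows.length ≤ k * p + fuel →
    (PySem.List.enumerate (rows.drop (k * p)) ((k * p : Nat) : Int)).foldl
        (pvBodyB (p : Int) w ((rows.length - rows.length % p : Nat) : Int) ((rows.length : Int))) acc
      = acc ++ pvRef w (p-1) (rows.drop (k * p)) := by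
  intro fuel
  induction fuel with
  | zero =>
      intro k acc hb
      rw [List.drop_eq_nil_of_le (by omega)]
      rw [pvRef]
      simp
  | succ fuel ih =>
      intro k acc hb
      set nn := rows.length with hnn
      set xs := rows.drop (k * p) with hxs
      by_cases hxnil : xs = []
      · rw [hxnil, pvRef]; simp
      · have hxlen : xs.length = nn - k * p := by simp [hxs, hnn]
        have hklt : k * p < nn := by
          have := List.length_pos_of_ne_nil hxnil; omega
        have hsub : nn - k * p + k * p = nn := Nat.sub_add_cancel (le_of_lt hklt)
        have hsub2 : nn - nn % p + nn % p = nn := Nat.sub_add_cancel (Nat.mod_le nn p)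
        by_cases hfull : p ≤ xs.length
        · -- a complete chunk
          conv_lhs => rw [← List.take_append_drop p xs]
          rw [PySem.List.enumerate_append, List.foldl_append]
          have htlen : (xs.take p).length = p := by simp [hfull]
          have hmul : (k+1) * p = k * p + p := by rw [Nat.add_mul, one_mul]
          have hk1 : (k+1) * p ≤ nn := by omega
          have hk1cut : (k+1) * p ≤ nn - nn % p := by
            have hd : nn / p * p + nn % p = nn := Nat.div_add_mod' nn p
            have hq : k + 1 ≤ nn / p := (Nat.le_div_iff_mul_le (by omega)).mpr hk1
            have := Nat.mul_le_mul_right p hq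
            omega
          rw [pv_B_chunkFull p w nn hp (xs.take p) k acc htlen hk1cut]
          have hdcast : ((k*p : Nat):Int) + ((xs.take p).length : Int) = (((k+1) * p : Nat) : Int) := by
            rw [htlen]; push_cast; ring
          rw [hdcast]
          have hdropdrop : xs.drop p = rows.drop ((k+1) * p) := by
            rw [hxs, List.drop_drop]; ring_nf
          rw [hdropdrop, ih (k+1) _ (by omega)]
          conv_rhs => rw [pvRef]
          rw [dif_neg hxnil, if_pos (by omega : (p-1) + 1 ≤ xs.length),
            show (p-1) + 1 = p by omega, hdropdrop]
          simp [List.append_assoc]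
        · -- the incomplete trailing row: k*p must be exactly nn - nn % p
          have hxslt : xs.length < p := by omega
          have hcut_eq : k * p = nn - nn % p := by
            have hd : nn / p * p + nn % p = nn := Nat.div_add_mod' nn p
            have h2 : nn < (k+1) * p := by
              rw [Nat.add_mul, one_mul]; omega
            have hdiv : nn / p = k := Nat.div_eq_of_lt_le (le_of_lt hklt) h2
            rw [hdiv] at hd
            omega
          have hlen : xs.length = nn % p := by omega
          rw [hcut_eq] at hxs ⊢
          rw [pv_B_tail p w nn hp xs acc (by omega) hxnil]
          conv_rhs => rw [pvRef]
          rw [dif_neg hxnil, if_neg (by omega : ¬ ((p-1) + 1 ≤ xs.length))]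

-- ===== VERDICT (by name: the statement is the Claim_ definition above) =====
theorem images_to_html_spec : Claim_equal_images_to_html := by
  intro rows cols _dom
  unfold Spec_images_to_html images_to_html images_to_html_alt
  by_cases hnil : rows = []
  · subst hnil
    simp only [reduceIte, PySem.List.enumerate_nil, List.foldl_nil]
    rfl
  · rw [if_neg hnil]
    set per : Int := max 1 cols with hper
    have hperpos : 0 < per := by omega
    set p : Nat := per.toNat with hpdef
    have hp1 : 1 ≤ p := by omega
    have hpc : (p : Int) = per := Int.toNat_of_nonneg (by omega)
    have hw : PySem.Int.truncdiv 100 per - 1 = PySem.Int.floordiv 100 per - 1 := by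
      rw [pv_trunc_eq_floor 100 per (by omega) hperpos]
    set w : Int := PySem.Int.floordiv 100 per - 1 with hwdef
    set nn : Nat := rows.length with hnn
    have hcutc : (nn : Int) - PySem.Int.mod (nn : Int) per = ((nn - nn % p : Nat) : Int) := by
      rw [← hpc, PySem.Int.mod_natCast]
      have := Nat.mod_le nn p
      push_cast
      omega
    have hA : (PySem.List.pyRange 0 (nn : Int) per).foldl (pvBodyA rows per w) []
        = pvRef w (p-1) rows := by
      have := pv_A_loop rows w p hp1 nn 0 [] (by omega)
      rw [hpc] at this
      simpa using this
    have hB : (PySem.List.enumerate rows 0).foldl (pvBodyB per w ((nn - nn % p : Nat) : Int) ((nn : Int))) []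
        = pvRef w (p-1) rows := by
      have := pv_B_loop rows w p hp1 nn 0 [] (by omega)
      rw [hpc] at this
      simpa using this
    simp only [hw, hcutc, hA]
    rw [← hwdef, hB]
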